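-- pv_equiv track=rewrite | github.com/McElyea/Orket | orket/runtime/evidence/run_graph_reconstruction.py | _ledger_schema_version
-- ===== SOURCE A (Python) =====
-- from typing import Any
--
-- def _ledger_schema_version(events: list[dict[str, Any]]) -> str:
--     versions = sorted(
--         {
--             str(event.get("ledger_schema_version") or "1.0").strip()
--             for event in events
--             if str(event.get("ledger_schema_version") or "1.0").strip()
--         }
--     )
--     if not versions:
--         return "1.0"
--     return versions[0] if len(versions) == 1 else "mixed"
-- ===== SOURCE B (Python) =====
-- from typing import Any
--
-- def _ledger_schema_version(events: list[dict[str, Any]]) -> str: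
--     found = None
--     for event in events:
--         v = str(event.get("ledger_schema_version") or "1.0").strip()
--         if not v:
--             continue
--         if found is None:
--             found = v
--         elif v != found:
--             return "mixed"
--     return found if found is not None else "1.0"
-- ===== Notes on version B (the rewrite author's own statement) =====
-- stated objective: simpler
-- what changed: Replaces the set-comprehension + sort + length branch with a single early-exiting pass that tracks one 'found' variable and returns 'mixed' on the first conflicting version.
import Mathlib
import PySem

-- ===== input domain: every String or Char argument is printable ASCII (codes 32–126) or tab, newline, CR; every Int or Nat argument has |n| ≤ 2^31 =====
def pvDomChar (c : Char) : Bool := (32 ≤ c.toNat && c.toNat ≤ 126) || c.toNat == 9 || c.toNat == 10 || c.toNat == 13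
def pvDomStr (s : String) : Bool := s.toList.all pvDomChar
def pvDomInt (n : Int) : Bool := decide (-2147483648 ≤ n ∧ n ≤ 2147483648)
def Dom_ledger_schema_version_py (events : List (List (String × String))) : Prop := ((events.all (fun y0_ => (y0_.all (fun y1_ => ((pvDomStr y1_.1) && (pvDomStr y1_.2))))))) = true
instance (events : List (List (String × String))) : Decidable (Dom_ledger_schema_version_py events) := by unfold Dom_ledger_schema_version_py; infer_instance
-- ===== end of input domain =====

-- B replaces A's set + sort + length-branch by a single early-exiting pass with one
-- 'found' variable (objective: simpler).

-- shared normalization: str(event.get("ledger_schema_version") or "1.0").strip()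
def pvNorm (event : List (String × String)) : String :=
  PySem.Str.strip
    (match (PySem.Dict.mk event).get? "ledger_schema_version" with
     | none => "1.0"
     | some s => if s = "" then "1.0" else s)

-- ===== PORT A =====
def ledger_schema_version_py (events : List (List (String × String))) : String :=
  let versions :=
    PySem.List.sorted
      (PySem.Set.ofList
        (events.filterMap (fun event =>
          let v := pvNorm event
          if v = "" then none else some v)))
      (fun x => x) false
  match versions with
  | [] => "1.0"
  | [v] => v            -- len(versions) == 1 → versions[0]
  | _ => "mixed"

-- ===== PORT B =====
def pvAltGo (found : Option String) : List (List (String × String)) → String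
  | [] => match found with
          | some f => f
          | none => "1.0"
  | event :: rest =>
    let v := pvNorm event
    if v = "" then pvAltGo found rest
    else match found with
         | none => pvAltGo (some v) rest
         | some f => if v ≠ f then "mixed" else pvAltGo (some f) rest

def ledger_schema_version_py_alt (events : List (List (String × String))) : String :=
  pvAltGo none events

-- ===== PRECONDITION & SPEC =====
def Spec_ledger_schema_version_py (events : List (List (String × String))) (out : String) : Prop := out = ledger_schema_version_py_alt events
instance (events : List (List (String × String))) (out : String) : Decidable (Spec_ledger_schema_version_py events out) := by unfold Spec_ledger_schema_version_py; infer_instance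

-- ===== CLAIM (what is proved, stated in full; the proofs are below) =====
def Claim_equal_ledger_schema_version_py : Prop := ∀ (events : List (List (String × String))), Dom_ledger_schema_version_py events → Spec_ledger_schema_version_py events (ledger_schema_version_py events)

-- ===== LEMMAS AND PROOFS =====

-- the filtered list of normalized versions both programs are really about
def pvVers (events : List (List (String × String))) : List String :=
  events.filterMap (fun event =>
    let v := pvNorm event
    if v = "" then none else some v)

-- B's scan expressed over the filtered version list
def pvScan (found : Option String) : List String → String
  | [] => match found with
          | some f => f
          | none => "1.0"
  | v :: rest =>
    match found with
    | none => pvScan (some v) rest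
    | some f => if v ≠ f then "mixed" else pvScan (some f) rest

theorem pvAltGo_eq_scan (found : Option String) (events : List (List (String × String))) :
    pvAltGo found events = pvScan found (pvVers events) := by
  induction events generalizing found with
  | nil => rfl
  | cons e rest ih =>
    simp only [pvAltGo, pvVers, List.filterMap_cons]
    by_cases h : pvNorm e = ""
    · simp only [if_pos h]
      simpa [pvVers] using ih found
    · simp only [if_neg h]
      cases found with
      | none => simpa [pvScan, pvVers] using ih (some (pvNorm e))
      | some f =>
        by_cases hf : pvNorm e = f
        · simp only [pvScan, hf, ne_eq, not_true_eq_false, if_false]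
          simpa [pvScan, hf, pvVers] using ih (some f)
        · simp [pvScan, hf]

theorem pvScan_some (f : String) (vs : List String) :
    pvScan (some f) vs = if vs.all (· == f) then f else "mixed" := by
  induction vs with
  | nil => rfl
  | cons v rest ih =>
    by_cases hv : v = f
    · simp [pvScan, hv, ih]
    · simp [pvScan, hv]

theorem pvFoldl_add_of_all (v : String) (rest : List String) (h : ∀ x ∈ rest, x = v) :
    rest.foldl PySem.Set.add [v] = [v] := by
  induction rest with
  | nil => rfl
  | cons w ws ih =>
    have hw : w = v := h w (by simp)
    have hadd : PySem.Set.add [v] w = ([v] : List String) := by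
      simp [PySem.Set.add, PySem.Set.contains, hw]
    simp only [List.foldl_cons, hadd]
    exact ih (fun x hx => h x (by simp [hx]))

theorem pvOfList_all (v : String) (rest : List String) (h : ∀ x ∈ rest, x = v) :
    PySem.Set.ofList (v :: rest) = [v] := by
  rw [PySem.Set.ofList_eq_foldl]
  simp only [List.foldl_cons]
  have hadd : PySem.Set.add ([] : List String) v = [v] := by
    simp [PySem.Set.add, PySem.Set.contains]
  rw [hadd]
  exact pvFoldl_add_of_all v rest h

theorem ledger_schema_version_py_spec : Claim_equal_ledger_schema_version_py := by
  intro events _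
  unfold Spec_ledger_schema_version_py
  show ledger_schema_version_py events = ledger_schema_version_py_alt events
  unfold ledger_schema_version_py ledger_schema_version_py_alt
  rw [pvAltGo_eq_scan]
  have hvs : events.filterMap (fun event =>
      let v := pvNorm event
      if v = "" then none else some v) = pvVers events := rfl
  rw [hvs]
  cases hv : pvVers events with
  | nil =>
    have hs : PySem.List.sorted (PySem.Set.ofList ([] : List String)) (fun x => x) false = [] := rfl
    simp only [hs, pvScan]
  | cons v rest =>
    simp only [pvScan]
    rw [pvScan_some]
    cases hall : rest.all (· == v) with
    | true =>
      have hall' : ∀ x ∈ rest, x = v := by simpa using List.all_eq_true.mp hall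
      rw [pvOfList_all v rest hall']
      rfl
    | false =>
      obtain ⟨w, hwmem, hwne⟩ : ∃ w ∈ rest, w ≠ v := by
        simpa using List.all_eq_false.mp hall
      simp only [Bool.false_eq_true, if_false]
      have hvmem : v ∈ PySem.List.sorted (PySem.Set.ofList (v :: rest)) (fun x => x) false := by
        rw [PySem.List.mem_sorted, PySem.Set.mem_ofList]; simp
      have hwmem' : w ∈ PySem.List.sorted (PySem.Set.ofList (v :: rest)) (fun x => x) false := by
        rw [PySem.List.mem_sorted, PySem.Set.mem_ofList]; simp [hwmem]
      cases hs : PySem.List.sorted (PySem.Set.ofList (v :: rest)) (fun x => x) false with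
      | nil => rw [hs] at hvmem; simp at hvmem
      | cons a t =>
        cases t with
        | nil =>
          rw [hs] at hvmem hwmem'
          simp at hvmem hwmem'
          exact absurd (hwmem'.trans hvmem.symm) hwne
        | cons b t' => rfl
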